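-- pv_equiv track=rewrite | github.com/FX84/Backtest-Trading-Strategies | backtest.py | consecutive_counts
-- ===== SOURCE A (Python) =====
-- from typing import Dict, List, Optional, Tuple
--
-- def consecutive_counts(bools: List[bool]) -> Tuple[int, int]:
--     """Максимальные серии выигрышей/проигрышей."""
--     max_wins = max_losses = cur_wins = cur_losses = 0
--     for b in bools:
--         if b:
--             cur_wins += 1
--             cur_losses = 0
--         else:
--             cur_losses += 1
--             cur_wins = 0
--         max_wins = max(max_wins, cur_wins)
--         max_losses = max(max_losses, cur_losses)
--     return max_wins, max_losses
-- ===== SOURCE B (Python) =====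
-- from itertools import groupby
-- from typing import List, Tuple
--
--
-- def consecutive_counts(bools: List[bool]) -> Tuple[int, int]:
--     """Максимальные серии выигрышей/проигрышей via run-length grouping."""
--     runs = [(k, sum(1 for _ in g)) for k, g in groupby(bools, key=bool)]
--     max_wins = max((n for k, n in runs if k), default=0)
--     max_losses = max((n for k, n in runs if not k), default=0)
--     return max_wins, max_losses
-- ===== Notes on version B (the rewrite author's own statement) =====
-- stated objective: idiomatic
-- what changed: Replaces the four-counter single loop with itertools.groupby run-length decomposition followed by two max(..., default=0) reductions over the run lengths.
import Mathlib
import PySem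

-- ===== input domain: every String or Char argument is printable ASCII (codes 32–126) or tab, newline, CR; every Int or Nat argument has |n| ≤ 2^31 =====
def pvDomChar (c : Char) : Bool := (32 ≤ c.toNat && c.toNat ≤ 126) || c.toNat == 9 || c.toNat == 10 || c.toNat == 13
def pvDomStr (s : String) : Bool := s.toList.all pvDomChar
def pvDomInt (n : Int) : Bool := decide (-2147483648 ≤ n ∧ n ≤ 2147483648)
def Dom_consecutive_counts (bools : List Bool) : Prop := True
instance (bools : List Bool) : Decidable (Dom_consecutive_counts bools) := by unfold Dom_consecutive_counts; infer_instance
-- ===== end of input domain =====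

-- B replaces A's four-counter loop with a groupby run-length decomposition plus two max-reductions (idiomatic; same O(n) cost).

-- ===== PORT A =====
-- A's loop body: update the current streak, reset the other, then take running maxima.
def pvStepA (st : Int × Int × Int × Int) (b : Bool) : Int × Int × Int × Int :=
  if b then (max st.1 (st.2.2.1 + 1), max st.2.1 0, st.2.2.1 + 1, 0)
  else (max st.1 0, max st.2.1 (st.2.2.2 + 1), 0, st.2.2.2 + 1)

def consecutive_counts (bools : List Bool) : Int × Int :=
  let s := bools.foldl pvStepA (0, 0, 0, 0)
  (s.1, s.2.1)

-- ===== PORT B =====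
-- groupby: pvGo k n t extends the current run (key k, length n so far) through t.
def pvGo (k : Bool) (n : Int) : List Bool → List (Bool × Int)
  | [] => [(k, n)]
  | b :: t => if b = k then pvGo k (n + 1) t else (k, n) :: pvGo b 1 t

def pvRuns : List Bool → List (Bool × Int)
  | [] => []
  | b :: t => pvGo b 1 t

-- max((n for k, n in runs if k == c), default=0)
def pvMaxBy (c : Bool) (rs : List (Bool × Int)) : Int :=
  rs.foldl (fun a q => if q.1 = c then max a q.2 else a) 0

def consecutive_counts_alt (bools : List Bool) : Int × Int :=
  let runs := pvRuns bools
  (pvMaxBy true runs, pvMaxBy false runs)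

-- ===== PRECONDITION & SPEC =====
def Spec_consecutive_counts (bools : List Bool) (out : Int × Int) : Prop := out = consecutive_counts_alt bools
instance (bools : List Bool) (out : Int × Int) : Decidable (Spec_consecutive_counts bools out) := by unfold Spec_consecutive_counts; infer_instance

-- ===== CLAIM (what is proved, stated in full; the proofs are below) =====
def Claim_equal_consecutive_counts : Prop := ∀ (bools : List Bool), Dom_consecutive_counts bools → Spec_consecutive_counts bools (consecutive_counts bools)

-- ===== LEMMAS AND PROOFS =====

lemma pvFoldl_max (c : Bool) : ∀ (rs : List (Bool × Int)) (a b : Int),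
    rs.foldl (fun x q => if q.1 = c then max x q.2 else x) (max a b)
      = max a (rs.foldl (fun x q => if q.1 = c then max x q.2 else x) b) := by
  intro rs
  induction rs with
  | nil => intro a b; simp
  | cons p t ih =>
    intro a b
    simp only [List.foldl]
    by_cases h : p.1 = c
    · simp only [h, max_assoc]
      exact ih a (max b p.2)
    · simp only [if_neg h]
      exact ih a b

lemma pvFoldl_le (c : Bool) : ∀ (rs : List (Bool × Int)) (a : Int),
    a ≤ rs.foldl (fun x q => if q.1 = c then max x q.2 else x) a := by
  intro rs
  induction rs with
  | nil => intro a; simp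
  | cons p t ih =>
    intro a
    simp only [List.foldl]
    by_cases h : p.1 = c
    · simp only [if_pos h]
      exact le_trans (le_max_left a p.2) (ih _)
    · simp only [if_neg h]
      exact ih a

lemma pvMaxBy_nonneg (c : Bool) (rs : List (Bool × Int)) : 0 ≤ pvMaxBy c rs :=
  pvFoldl_le c rs 0

lemma pvGo_le_maxBy (c : Bool) : ∀ (t : List Bool) (n : Int), n ≤ pvMaxBy c (pvGo c n t) := by
  intro t
  induction t with
  | nil =>
    intro n
    simp [pvGo, pvMaxBy]
  | cons b t ih =>
    intro n
    by_cases h : b = c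
    · simp only [pvGo, if_pos h]
      exact le_trans (by omega) (ih (n + 1))
    · simp only [pvGo, if_neg h, pvMaxBy, List.foldl]
      calc n ≤ max 0 n := le_max_right 0 n
        _ ≤ _ := pvFoldl_le c _ _

-- cons step of pvMaxBy, split by whether the head's key matches
lemma pvMaxBy_cons_eq (c : Bool) (n : Int) (hn : 0 ≤ n) (rs : List (Bool × Int)) :
    pvMaxBy c ((c, n) :: rs) = max n (pvMaxBy c rs) := by
  simp only [pvMaxBy, List.foldl, if_true]
  rw [show max 0 n = max n 0 by omega, pvFoldl_max]

lemma pvMaxBy_cons_ne (c k : Bool) (hk : k ≠ c) (n : Int) (rs : List (Bool × Int)) :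
    pvMaxBy c ((k, n) :: rs) = pvMaxBy c rs := by
  simp [pvMaxBy, List.foldl, hk]

-- Main invariant: running A's loop from a state whose current streak is the
-- run (k, n) yields the maxima of the run decomposition, joined with mw/ml.
lemma pvLoop_go : ∀ (t : List Bool) (k : Bool) (n mw ml : Int),
    1 ≤ n → 0 ≤ mw → 0 ≤ ml → (k = true → n ≤ mw) → (k = false → n ≤ ml) →
    (t.foldl pvStepA (mw, ml, if k then n else 0, if k then 0 else n)).1
        = max mw (pvMaxBy true (pvGo k n t))
    ∧ (t.foldl pvStepA (mw, ml, if k then n else 0, if k then 0 else n)).2.1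
        = max ml (pvMaxBy false (pvGo k n t)) := by
  intro t
  induction t with
  | nil =>
    intro k n mw ml h1 hmw hml hkt hkf
    cases k
    · simp only [pvGo, Bool.false_eq_true, if_false, if_true, List.foldl, pvMaxBy]
      have := hkf rfl
      constructor <;> simp <;> omega
    · simp only [pvGo, if_true, List.foldl, pvMaxBy]
      have := hkt rfl
      constructor <;> simp <;> omega
  | cons b t ih =>
    intro k n mw ml h1 hmw hml hkt hkf
    cases k
    · -- current run is False: state (mw, ml, 0, n)
      have hml' := hkf rfl
      cases b
      · -- b = false: run extends
        have hstep : pvStepA (mw, ml, (0 : Int), n) false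
            = (mw, max ml (n + 1), 0, n + 1) := by
          simp [pvStepA]; omega
        simp only [List.foldl, Bool.false_eq_true, if_false] at *
        rw [hstep]
        have ihh := ih false (n + 1) mw (max ml (n + 1)) (by omega) hmw (by omega)
          (by intro h; exact absurd h (by simp)) (by intro _; omega)
        simp only [Bool.false_eq_true, if_false] at ihh
        have hle : n + 1 ≤ pvMaxBy false (pvGo false (n + 1) t) :=
          pvGo_le_maxBy false t (n + 1)
        simp only [pvGo, if_true]
        exact ⟨ihh.1, by rw [ihh.2]; omega⟩
      · -- b = true: run breaks
        have hstep : pvStepA (mw, ml, (0 : Int), n) true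
            = (max mw 1, ml, 1, 0) := by
          simp [pvStepA]; omega
        simp only [List.foldl, Bool.false_eq_true, if_false] at *
        rw [hstep]
        have ihh := ih true 1 (max mw 1) ml (by omega) (by omega) hml
          (by intro _; omega) (by intro h; exact absurd h (by simp))
        simp only [if_true] at ihh
        have hgo : pvGo false n (true :: t) = (false, n) :: pvGo true 1 t := by
          simp [pvGo]
        rw [hgo, pvMaxBy_cons_ne true false (by simp),
            pvMaxBy_cons_eq false n (by omega)]
        have hle : 1 ≤ pvMaxBy true (pvGo true 1 t) := pvGo_le_maxBy true t 1
        exact ⟨by rw [ihh.1]; omega, by rw [ihh.2]; omega⟩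
    · -- current run is True: state (mw, ml, n, 0)
      have hmw' := hkt rfl
      cases b
      · -- b = false: run breaks
        have hstep : pvStepA (mw, ml, n, (0 : Int)) false
            = (max mw 0, max ml 1, 0, 1) := by
          simp [pvStepA]
        simp only [List.foldl, if_true] at *
        rw [hstep, show max mw (0 : Int) = mw by omega]
        have ihh := ih false 1 mw (max ml 1) (by omega) hmw (by omega)
          (by intro h; exact absurd h (by simp)) (by intro _; omega)
        simp only [Bool.false_eq_true, if_false] at ihh
        have hgo : pvGo true n (false :: t) = (true, n) :: pvGo false 1 t := by
          simp [pvGo]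
        rw [hgo, pvMaxBy_cons_eq true n (by omega),
            pvMaxBy_cons_ne false true (by simp)]
        have hle : 1 ≤ pvMaxBy false (pvGo false 1 t) := pvGo_le_maxBy false t 1
        exact ⟨by rw [ihh.1]; omega, by rw [ihh.2]; omega⟩
      · -- b = true: run extends
        have hstep : pvStepA (mw, ml, n, (0 : Int)) true
            = (max mw (n + 1), max ml 0, n + 1, 0) := by
          simp [pvStepA]
        simp only [List.foldl, if_true] at *
        rw [hstep, show max ml (0 : Int) = ml by omega]
        have ihh := ih true (n + 1) (max mw (n + 1)) ml (by omega) (by omega) hml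
          (by intro _; omega) (by intro h; exact absurd h (by simp))
        simp only [if_true] at ihh
        have hle : n + 1 ≤ pvMaxBy true (pvGo true (n + 1) t) :=
          pvGo_le_maxBy true t (n + 1)
        simp only [pvGo, if_true]
        exact ⟨by rw [ihh.1]; omega, ihh.2⟩

-- ===== VERDICT (by name: the statement is the Claim_ definition above) =====
theorem consecutive_counts_spec : Claim_equal_consecutive_counts := by
  intro bools _
  unfold Spec_consecutive_counts
  cases bools with
  | nil => rfl
  | cons b t =>
    cases b
    · have hstep : pvStepA (0, 0, 0, 0) false = ((0 : Int), 1, 0, 1) := by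
        simp [pvStepA]
      have h := pvLoop_go t false 1 0 1 (by omega) (by omega) (by omega)
        (by intro h; exact absurd h (by simp)) (by intro _; omega)
      simp only [Bool.false_eq_true, if_false] at h
      have hT : 0 ≤ pvMaxBy true (pvGo false 1 t) := pvMaxBy_nonneg true _
      have hF : 1 ≤ pvMaxBy false (pvGo false 1 t) := pvGo_le_maxBy false t 1
      simp only [consecutive_counts, consecutive_counts_alt, pvRuns, List.foldl, hstep]
      exact Prod.ext (by rw [h.1]; omega) (by rw [h.2]; omega)
    · have hstep : pvStepA (0, 0, 0, 0) true = ((1 : Int), 0, 1, 0) := by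
        simp [pvStepA]
      have h := pvLoop_go t true 1 1 0 (by omega) (by omega) (by omega)
        (by intro _; omega) (by intro h; exact absurd h (by simp))
      simp only [if_true] at h
      have hT : 1 ≤ pvMaxBy true (pvGo true 1 t) := pvGo_le_maxBy true t 1
      have hF : 0 ≤ pvMaxBy false (pvGo true 1 t) := pvMaxBy_nonneg false _
      simp only [consecutive_counts, consecutive_counts_alt, pvRuns, List.foldl, hstep]
      exact Prod.ext (by rw [h.1]; omega) (by rw [h.2]; omega)
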